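-- pv_equiv track=rewrite | github.com/DPmooncake/Protein_Design | MutPred_v2/src/brenda_data/extract.py | build_organism_to_uniprot
-- ===== SOURCE A (Python) =====
-- from typing import List, Dict, Any
--
-- def build_organism_to_uniprot(sequence_entries: List[Dict[str, Any]]) -> Dict[str, str]:
--     """
--     将 Sequence 记录按 organism 聚合出 UniProt ID（firstAccessionCode）。
--     返回 {organism: accession}。
--     规则：
--         1) 每个 organism 只保留一个 accession（取去重后的第一个），避免变成一长串；
--         2) 不在这里跨物种合并，避免“全 EC 的所有 UniProt 全挤进一格”的情况。
--     """
--     mapping: Dict[str, str] = {}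
--     tmp: Dict[str, List[str]] = {}
--     for entry in sequence_entries:
--         org = entry.get("organism") or ""
--         acc = entry.get("firstAccessionCode") or ""
--         if not org or not acc:
--             continue
--         tmp.setdefault(org, []).append(str(acc).strip())
--     for org, accs in tmp.items():
--         uniq = sorted(set(accs))
--         if uniq:
--             mapping[org] = uniq[0]  # 只取第一个 accession，和网页显示一致
--     return mapping
-- ===== SOURCE B (Python) =====
-- def build_organism_to_uniprot(sequence_entries):
--     # One pass with a running minimum per organism: no per-organism lists,
--     # no set-dedup, no sorting, no second loop.
--     mapping = {}
--     for entry in sequence_entries: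
--         org = entry.get("organism") or ""
--         acc = entry.get("firstAccessionCode") or ""
--         if not org or not acc:
--             continue
--         a = str(acc).strip()
--         prev = mapping.get(org)
--         if prev is None or a < prev:
--             mapping[org] = a
--     return mapping
-- ===== Notes on version B (the rewrite author's own statement) =====
-- stated objective: alternative
-- what changed: Replaces A's two-phase group-then-dedup-then-sort construction (per-organism accession lists, set(), sorted(), take first) with a single pass keeping one running minimum accession per organism; no speed gain was measured.
import Mathlib
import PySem

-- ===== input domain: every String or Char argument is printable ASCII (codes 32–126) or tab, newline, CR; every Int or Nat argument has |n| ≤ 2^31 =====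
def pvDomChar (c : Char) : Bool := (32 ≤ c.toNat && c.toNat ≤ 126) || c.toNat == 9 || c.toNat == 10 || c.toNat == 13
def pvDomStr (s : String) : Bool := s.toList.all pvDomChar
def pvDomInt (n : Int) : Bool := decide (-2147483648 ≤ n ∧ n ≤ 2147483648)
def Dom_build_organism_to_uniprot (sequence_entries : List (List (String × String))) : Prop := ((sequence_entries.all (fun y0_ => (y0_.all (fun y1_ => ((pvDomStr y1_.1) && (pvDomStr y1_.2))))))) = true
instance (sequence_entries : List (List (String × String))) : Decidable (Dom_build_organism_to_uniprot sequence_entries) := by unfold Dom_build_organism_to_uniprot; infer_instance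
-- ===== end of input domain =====

-- B replaces A's two-phase group-then-dedup-then-sort construction with a single pass
-- keeping a running minimum accession per organism (objective: alternative algorithm).

-- ===== PORT A =====
-- entry.get(k) or ""  (a missing key and an empty value both become "")
def pvGetStr (entry : List (String × String)) (k : String) : String :=
  (PySem.Dict.mk entry).getD k ""

-- body of A's first loop: tmp.setdefault(org, []).append(str(acc).strip())
def pvStepA (tmp : PySem.Dict String (List String)) (entry : List (String × String)) :
    PySem.Dict String (List String) :=
  let org := pvGetStr entry "organism"
  let acc := pvGetStr entry "firstAccessionCode"
  if org = "" ∨ acc = "" then tmp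
  else tmp.modify org [] (fun l => l ++ [PySem.Str.strip acc])

-- body of A's second loop: uniq = sorted(set(accs)); if uniq: mapping[org] = uniq[0]
def pvStep2 (mapping : PySem.Dict String String) (p : String × List String) :
    PySem.Dict String String :=
  match PySem.List.sorted (PySem.Set.ofList p.2) (fun x => x) false with
  | [] => mapping
  | u :: _ => mapping.insert p.1 u

def build_organism_to_uniprot (sequence_entries : List (List (String × String))) :
    List (String × String) :=
  let tmp := sequence_entries.foldl pvStepA (PySem.Dict.empty : PySem.Dict String (List String))
  let mapping := tmp.items.foldl pvStep2 (PySem.Dict.empty : PySem.Dict String String)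
  mapping.items

-- ===== PORT B =====
-- body of B's single loop: keep the running minimum stripped accession per organism
def pvStepB (mapping : PySem.Dict String String) (entry : List (String × String)) :
    PySem.Dict String String :=
  let org := pvGetStr entry "organism"
  let acc := pvGetStr entry "firstAccessionCode"
  if org = "" ∨ acc = "" then mapping
  else
    let a := PySem.Str.strip acc
    match mapping.get? org with
    | none => mapping.insert org a
    | some prev => if a < prev then mapping.insert org a else mapping

def build_organism_to_uniprot_alt (sequence_entries : List (List (String × String))) :
    List (String × String) :=
  (sequence_entries.foldl pvStepB (PySem.Dict.empty : PySem.Dict String String)).items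

-- ===== PRECONDITION & SPEC =====
def Spec_build_organism_to_uniprot (sequence_entries : List (List (String × String))) (out : List (String × String)) : Prop := out = build_organism_to_uniprot_alt sequence_entries
instance (sequence_entries : List (List (String × String))) (out : List (String × String)) : Decidable (Spec_build_organism_to_uniprot sequence_entries out) := by unfold Spec_build_organism_to_uniprot; infer_instance

-- ===== CLAIM (what is proved, stated in full; the proofs are below) =====
def Claim_equal_build_organism_to_uniprot : Prop := ∀ (sequence_entries : List (List (String × String))), Dom_build_organism_to_uniprot sequence_entries → Spec_build_organism_to_uniprot sequence_entries (build_organism_to_uniprot sequence_entries)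

-- ===== LEMMAS AND PROOFS =====

-- head of sorted(set(l)), i.e. the minimum of l (for nonempty l)
def minStr (l : List String) : String :=
  match PySem.List.sorted (PySem.Set.ofList l) (fun x => x) false with
  | [] => ""
  | u :: _ => u

-- the dictionary A's second loop builds from tmp, expressed directly
def mkMin (d : PySem.Dict String (List String)) : PySem.Dict String String :=
  PySem.Dict.mk (d.items.map (fun p => (p.1, minStr p.2)))

lemma ofList_ne_nil {l : List String} (h : l ≠ []) : PySem.Set.ofList l ≠ [] := by
  intro he
  match l, h with
  | x :: xs, _ =>
    have : x ∈ PySem.Set.ofList (x :: xs) := (PySem.Set.mem_ofList _ _).mpr (by simp)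
    rw [he] at this; simp at this

lemma sorted_set_ne_nil {l : List String} (h : l ≠ []) :
    PySem.List.sorted (PySem.Set.ofList l) (fun x => x) false ≠ [] := by
  rw [Ne, PySem.List.sorted_eq_nil_iff]; exact ofList_ne_nil h

lemma minStr_mem {l : List String} (h : l ≠ []) : minStr l ∈ l := by
  unfold minStr
  cases hs : PySem.List.sorted (PySem.Set.ofList l) (fun x => x) false with
  | nil => exact absurd hs (sorted_set_ne_nil h)
  | cons u t =>
    simp only
    have : u ∈ PySem.List.sorted (PySem.Set.ofList l) (fun x => x) false := by simp [hs]
    rw [PySem.List.mem_sorted, PySem.Set.mem_ofList] at this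
    exact this

lemma minStr_le {l : List String} (h : l ≠ []) : ∀ y ∈ l, minStr l ≤ y := by
  unfold minStr
  cases hs : PySem.List.sorted (PySem.Set.ofList l) (fun x => x) false with
  | nil => exact absurd hs (sorted_set_ne_nil h)
  | cons u t =>
    intro y hy
    exact PySem.List.key_head_sorted_le _ _ hs y ((PySem.Set.mem_ofList _ _).mpr hy)

lemma minStr_eq {l : List String} {x : String} (hx : x ∈ l) (hmin : ∀ y ∈ l, x ≤ y) :
    minStr l = x := by
  have h : l ≠ [] := List.ne_nil_of_mem hx
  exact le_antisymm (minStr_le h x hx) (hmin _ (minStr_mem h))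

lemma minStr_singleton (a : String) : minStr [a] = a := by
  exact minStr_eq (by simp) (by intro y hy; simp at hy; simp [hy])

lemma minStr_append {l : List String} (h : l ≠ []) (a : String) :
    minStr (l ++ [a]) = if a < minStr l then a else minStr l := by
  by_cases hlt : a < minStr l
  · rw [if_pos hlt]
    refine minStr_eq (by simp) ?_
    intro y hy
    rcases List.mem_append.mp hy with hy | hy
    · exact le_trans (le_of_lt hlt) (minStr_le h y hy)
    · simp at hy; simp [hy]
  · rw [if_neg hlt]
    refine minStr_eq (List.mem_append_left _ (minStr_mem h)) ?_
    intro y hy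
    rcases List.mem_append.mp hy with hy | hy
    · exact minStr_le h y hy
    · simp at hy; subst hy; exact not_lt.mp hlt

lemma get?_mk_map (l : List (String × List String)) (k : String) :
    (PySem.Dict.mk (l.map (fun p => (p.1, minStr p.2)))).get? k
      = ((PySem.Dict.mk l).get? k).map minStr := by
  induction l with
  | nil => rfl
  | cons p t ih =>
    obtain ⟨a, b⟩ := p
    simp only [List.map_cons, PySem.Dict.get?_mk_cons]
    by_cases h : a == k
    · simp [h]
    · simp only [h, Bool.false_eq_true, ite_false]; exact ih

lemma get?_mkMin (d : PySem.Dict String (List String)) (k : String) :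
    (mkMin d).get? k = (d.get? k).map minStr := get?_mk_map d.items k

lemma keys_mkMin (d : PySem.Dict String (List String)) : (mkMin d).keys = d.keys := by
  simp [mkMin, PySem.Dict.keys]

lemma contains_mkMin (d : PySem.Dict String (List String)) (k : String) :
    (mkMin d).contains k = d.contains k := by
  rw [PySem.Dict.contains_eq_decide_mem_keys, PySem.Dict.contains_eq_decide_mem_keys, keys_mkMin]

-- the loop invariant of A's grouping phase
def pvInv (d : PySem.Dict String (List String)) : Prop :=
  d.keys.Nodup ∧ ∀ p ∈ d.items, p.2 ≠ []

lemma pvStepA_inv {tmp : PySem.Dict String (List String)} (h : pvInv tmp)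
    (e : List (String × String)) : pvInv (pvStepA tmp e) := by
  unfold pvStepA
  by_cases hc : pvGetStr e "organism" = "" ∨ pvGetStr e "firstAccessionCode" = ""
  · simpa [hc] using h
  · rw [if_neg hc]
    have hmod : tmp.modify (pvGetStr e "organism") []
        (fun l => l ++ [PySem.Str.strip (pvGetStr e "firstAccessionCode")])
        = tmp.insert (pvGetStr e "organism")
            (tmp.getD (pvGetStr e "organism") [] ++ [PySem.Str.strip (pvGetStr e "firstAccessionCode")]) := rfl
    rw [hmod]
    refine ⟨PySem.Dict.nodup_keys_insert _ _ _ h.1, ?_⟩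
    intro p hp
    rcases (PySem.Dict.mem_items_insert _ _ _ _).mp hp with hp | hp
    · subst hp; simp
    · exact h.2 p hp.1

-- the heart: one B-step on mkMin tmp is mkMin of one A-grouping-step
lemma step_commute {tmp : PySem.Dict String (List String)} (h : pvInv tmp)
    (e : List (String × String)) : pvStepB (mkMin tmp) e = mkMin (pvStepA tmp e) := by
  unfold pvStepA pvStepB
  by_cases hc : pvGetStr e "organism" = "" ∨ pvGetStr e "firstAccessionCode" = ""
  · rw [if_pos hc, if_pos hc]
  · rw [if_neg hc, if_neg hc]
    set org := pvGetStr e "organism"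
    set a := PySem.Str.strip (pvGetStr e "firstAccessionCode")
    have hmod : tmp.modify org [] (fun l => l ++ [a])
        = tmp.insert org (tmp.getD org [] ++ [a]) := rfl
    rw [hmod, get?_mkMin]
    cases hg : tmp.get? org with
    | none =>
      have hco : tmp.contains org = false := by
        rw [PySem.Dict.contains_eq_isSome_get?, hg]; rfl
      have hgd : tmp.getD org [] = [] := PySem.Dict.getD_of_get?_eq_none tmp [] hg
      simp only [Option.map_none]
      apply PySem.Dict.ext
      rw [PySem.Dict.items_insert_of_not_contains _ _ ((contains_mkMin tmp org).trans hco)]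
      show (mkMin tmp).items ++ [(org, a)]
          = (tmp.insert org (tmp.getD org [] ++ [a])).items.map (fun p => (p.1, minStr p.2))
      rw [PySem.Dict.items_insert_of_not_contains _ _ hco, hgd]
      simp [mkMin, minStr_singleton]
    | some accs =>
      have hmem : (org, accs) ∈ tmp.items := PySem.Dict.mem_items_of_get?_eq_some tmp hg
      have hane : accs ≠ [] := h.2 _ hmem
      have hco : tmp.contains org = true := by
        rw [PySem.Dict.contains_eq_isSome_get?, hg]; rfl
      have hgd : tmp.getD org [] = accs := PySem.Dict.getD_of_get?_eq_some tmp [] hg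
      rw [hgd]
      simp only [Option.map_some]
      by_cases hlt : a < minStr accs
      · rw [if_pos hlt]
        apply PySem.Dict.ext
        rw [PySem.Dict.items_insert_of_contains _ _ ((contains_mkMin tmp org).trans hco)]
        show ((tmp.items.map (fun p => (p.1, minStr p.2))).map (fun q => if q.1 == org then (org, a) else q))
            = ((tmp.insert org (accs ++ [a])).items).map (fun p => (p.1, minStr p.2))
        rw [PySem.Dict.items_insert_of_contains _ _ hco]
        rw [List.map_map, List.map_map]
        apply List.map_congr_left
        intro p hp
        by_cases hk : p.1 == org
        · simp only [Function.comp, hk, if_pos]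
          rw [minStr_append hane a, if_pos hlt]
        · simp only [Function.comp, hk, Bool.false_eq_true, ite_false]
      · rw [if_neg hlt]
        apply PySem.Dict.ext
        show (tmp.items.map (fun p => (p.1, minStr p.2)))
            = ((tmp.insert org (accs ++ [a])).items).map (fun p => (p.1, minStr p.2))
        rw [PySem.Dict.items_insert_of_contains _ _ hco]
        rw [List.map_map]
        apply List.map_congr_left
        intro p hp
        by_cases hk : p.1 == org
        · have hporg : p.1 = org := by simpa using hk
          have hpacc : tmp.get? p.1 = some p.2 := by
            obtain ⟨p1, p2⟩ := p
            exact PySem.Dict.get?_of_mem_items _ hp h.1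
          rw [hporg] at hpacc
          have hacc : accs = p.2 := by
            have := hg.symm.trans hpacc
            exact Option.some.inj this
          simp only [Function.comp, hk, ite_true]
          rw [minStr_append hane a, if_neg hlt, hporg, hacc]
        · simp only [Function.comp, hk, Bool.false_eq_true, ite_false]

lemma loop_eq (es : List (List (String × String))) :
    ∀ (tmp : PySem.Dict String (List String)), pvInv tmp →
      es.foldl pvStepB (mkMin tmp) = mkMin (es.foldl pvStepA tmp) := by
  induction es with
  | nil => intro tmp _; rfl
  | cons e es ih =>
    intro tmp h
    simp only [List.foldl_cons]
    rw [step_commute h e]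
    exact ih _ (pvStepA_inv h e)

lemma inv_loop (es : List (List (String × String))) :
    ∀ (tmp : PySem.Dict String (List String)), pvInv tmp → pvInv (es.foldl pvStepA tmp) := by
  induction es with
  | nil => intro tmp h; exact h
  | cons e es ih =>
    intro tmp h
    exact ih _ (pvStepA_inv h e)

-- A's second loop over a grouped tmp is exactly mkMin
lemma second_eq {tmp : PySem.Dict String (List String)} (h : pvInv tmp) :
    tmp.items.foldl pvStep2 (PySem.Dict.empty : PySem.Dict String String) = mkMin tmp := by
  have hstep : tmp.items.foldl pvStep2 (PySem.Dict.empty : PySem.Dict String String)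
      = tmp.items.foldl (fun m p => m.insert p.1 (minStr p.2)) PySem.Dict.empty := by
    apply PySem.List.foldl_congr_mem
    intro m p hp
    have hne : p.2 ≠ [] := h.2 p hp
    unfold pvStep2
    cases hs : PySem.List.sorted (PySem.Set.ofList p.2) (fun x => x) false with
    | nil => exact absurd hs (sorted_set_ne_nil hne)
    | cons u t =>
      have : minStr p.2 = u := by unfold minStr; rw [hs]
      rw [this]
  rw [hstep]
  apply PySem.Dict.ext
  rw [PySem.Dict.items_foldl_insert_fresh tmp.items (fun p => p.1) (fun p => minStr p.2)
        PySem.Dict.empty (by intro p hp; exact PySem.Dict.contains_empty _) h.1]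
  rfl

lemma inv_empty : pvInv (PySem.Dict.empty : PySem.Dict String (List String)) := by
  exact ⟨List.nodup_nil, by intro p hp; simp [PySem.Dict.empty] at hp⟩

-- ===== VERDICT (by name: the statement is the Claim_ definition above) =====
theorem build_organism_to_uniprot_spec : Claim_equal_build_organism_to_uniprot := by
  intro es _
  show ((List.foldl pvStepA PySem.Dict.empty es).items.foldl pvStep2 PySem.Dict.empty).items
      = (List.foldl pvStepB PySem.Dict.empty es).items
  have h1 : (PySem.Dict.empty : PySem.Dict String String)
      = mkMin (PySem.Dict.empty : PySem.Dict String (List String)) := rfl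
  rw [second_eq (inv_loop es _ inv_empty), h1, loop_eq es _ inv_empty]
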